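-- pv_equiv track=rewrite | github.com/varchanaiyer/DataWhisperer | pages/Model Generation.py | extract_pipeline_description
-- ===== SOURCE A (Python) =====
-- def extract_pipeline_description(pipeline_name):
--     # Split the pipeline name by whitespace to process each word.
--     words = pipeline_name.split()
--
--     # Initialize an empty description.
--     description = []
--
--     # Iterate through words until 'Classifier' is encountered.
--     for word in words:
--         description.append(word)
--         if 'Classifier' in word:
--             break
--
--     # Join the description into a single string and return.
--     return ' '.join(description)
-- ===== SOURCE B (Python) =====
-- def extract_pipeline_description(pipeline_name):
--     # Right-to-left pass: a word containing 'Classifier' resets the collected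
--     # tail, so the leftmost such word (processed last) keeps only itself and,
--     # via the remaining iterations, the words before it.
--     desc = []
--     for word in reversed(pipeline_name.split()):
--         if 'Classifier' in word:
--             desc = [word]
--         else:
--             desc = [word] + desc
--     return ' '.join(desc)
-- ===== Notes on version B (the rewrite author's own statement) =====
-- stated objective: alternative
-- what changed: Replaces A's left-to-right accumulate-and-break loop by a right-to-left fold over the reversed word list in which any 'Classifier' word resets the accumulator, so the leftmost one (processed last) truncates the tail; no early exit, opposite traversal order.
import Mathlib
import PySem

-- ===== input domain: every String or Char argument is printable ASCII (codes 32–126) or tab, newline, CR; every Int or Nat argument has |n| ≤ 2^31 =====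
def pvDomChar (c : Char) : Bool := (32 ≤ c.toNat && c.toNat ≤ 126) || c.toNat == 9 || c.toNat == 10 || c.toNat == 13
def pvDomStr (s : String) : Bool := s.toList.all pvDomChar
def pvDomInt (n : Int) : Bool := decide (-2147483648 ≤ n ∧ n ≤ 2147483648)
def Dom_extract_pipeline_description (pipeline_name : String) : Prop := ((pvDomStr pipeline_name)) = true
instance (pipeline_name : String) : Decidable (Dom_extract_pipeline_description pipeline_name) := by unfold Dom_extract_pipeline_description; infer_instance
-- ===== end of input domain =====

-- B replaces A's left-to-right accumulate-and-break loop by a right-to-left fold in which a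
-- 'Classifier' word resets the accumulator (objective: alternative; same cost).

-- ===== PORT A =====
-- A's for-loop with append and break, as structural recursion over the word list carrying the accumulator.
def pvLoopA : List String → List String → List String
  | [], acc => acc
  | w :: ws, acc =>
      let acc := acc ++ [w]
      if PySem.Str.isIn "Classifier" w then acc else pvLoopA ws acc

def extract_pipeline_description (pipeline_name : String) : String :=
  PySem.Str.join " " (pvLoopA (PySem.Str.split₀ pipeline_name) [])

-- ===== PORT B =====
-- Source B: 'for word in reversed(words)' updating desc is a right fold over the word list:
-- a 'Classifier' word replaces desc by [word], otherwise word is prepended.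
def extract_pipeline_description_alt (pipeline_name : String) : String :=
  PySem.Str.join " "
    ((PySem.Str.split₀ pipeline_name).foldr
      (fun word desc => if PySem.Str.isIn "Classifier" word then [word] else word :: desc) [])

-- ===== PRECONDITION & SPEC =====
def Spec_extract_pipeline_description (pipeline_name : String) (out : String) : Prop := out = extract_pipeline_description_alt pipeline_name
instance (pipeline_name : String) (out : String) : Decidable (Spec_extract_pipeline_description pipeline_name out) := by unfold Spec_extract_pipeline_description; infer_instance

-- ===== CLAIM (what is proved, stated in full; the proofs are below) =====
def Claim_equal_extract_pipeline_description : Prop := ∀ (pipeline_name : String), Dom_extract_pipeline_description pipeline_name → Spec_extract_pipeline_description pipeline_name (extract_pipeline_description pipeline_name)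

-- ===== LEMMAS AND PROOFS =====

-- A's break-loop from any accumulator equals the accumulator followed by B's right fold.
theorem pvLoopA_eq_foldr (ws acc : List String) :
    pvLoopA ws acc = acc ++
      ws.foldr (fun word desc => if PySem.Str.isIn "Classifier" word then [word] else word :: desc) [] := by
  induction ws generalizing acc with
  | nil => simp [pvLoopA]
  | cons w ws ih =>
      simp only [pvLoopA, List.foldr_cons]
      by_cases h : PySem.Chars.isIn ['C','l','a','s','s','i','f','i','e','r'] w.toList = true
      · simp [h]
      · simp only [Bool.not_eq_true] at h
        simp [h, ih]

-- ===== VERDICT (by name: the statement is the Claim_ definition above) =====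
theorem extract_pipeline_description_spec : Claim_equal_extract_pipeline_description := by
  intro s _
  unfold Spec_extract_pipeline_description extract_pipeline_description extract_pipeline_description_alt
  rw [pvLoopA_eq_foldr]
  simp
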